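-- pv_equiv track=rewrite | github.com/ducklove/finance-pi | src/finance_pi/admin/server.py | _basic_fundamental_metric
-- ===== SOURCE A (Python) =====
-- BASIC_FUNDAMENTAL_METRICS = {
--     "revenue": ("ifrs-full_Revenue", "ifrs_Revenue"),
--     "operating_profit": ("dart_OperatingIncomeLoss",),
--     "net_income": (
--         "ifrs-full_ProfitLossAttributableToOwnersOfParent",
--         "ifrs_ProfitLossAttributableToOwnersOfParent",
--         "ifrs-full_ProfitLoss",
--         "ifrs_ProfitLoss",
--     ),
--     "assets": ("ifrs-full_Assets", "ifrs_Assets"),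
--     "liabilities": ("ifrs-full_Liabilities", "ifrs_Liabilities"),
--     "equity": (
--         "ifrs-full_EquityAttributableToOwnersOfParent",
--         "ifrs_EquityAttributableToOwnersOfParent",
--         "ifrs-full_Equity",
--         "ifrs_Equity",
--     ),
--     "cash_and_equivalents": (
--         "ifrs-full_CashAndCashEquivalents",
--         "ifrs_CashAndCashEquivalents",
--     ),
--     "operating_cash_flow": (
--         "ifrs-full_CashFlowsFromUsedInOperatingActivities",
--         "ifrs_CashFlowsFromUsedInOperatingActivities",
--     ),
--     "dividends_paid": (
--         "ifrs-full_DividendsPaidClassifiedAsFinancingActivities",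
--         "ifrs_DividendsPaidClassifiedAsFinancingActivities",
--         "ifrs-full_DividendsPaid",
--         "ifrs_DividendsPaid",
--         "dart_AnnualDividendsPaid",
--     ),
--     "treasury_share_purchase": (
--         "dart_AcquisitionOfTreasuryShares",
--         "ifrs-full_PurchaseOfTreasuryShares",
--         "ifrs_PurchaseOfTreasuryShares",
--     ),
--     "treasury_share_sale": (
--         "ifrs-full_SaleOrIssueOfTreasuryShares",
--         "dart_DispositionOfTreasuryShares",
--     ),
--     "treasury_share_cancellation": ("ifrs-full_CancellationOfTreasuryShares",),
-- }
--
-- def _basic_fundamental_metric(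
--     account_id: str,
--     metrics: dict[str, tuple[str, ...]] = BASIC_FUNDAMENTAL_METRICS,
-- ) -> str | None:
--     for metric, accounts in metrics.items():
--         if account_id in accounts:
--             return metric
--     return None
-- ===== SOURCE B (Python) =====
-- BASIC_FUNDAMENTAL_METRICS = {
--     "revenue": ("ifrs-full_Revenue", "ifrs_Revenue"),
--     "operating_profit": ("dart_OperatingIncomeLoss",),
--     "net_income": (
--         "ifrs-full_ProfitLossAttributableToOwnersOfParent",
--         "ifrs_ProfitLossAttributableToOwnersOfParent",
--         "ifrs-full_ProfitLoss",
--         "ifrs_ProfitLoss",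
--     ),
--     "assets": ("ifrs-full_Assets", "ifrs_Assets"),
--     "liabilities": ("ifrs-full_Liabilities", "ifrs_Liabilities"),
--     "equity": (
--         "ifrs-full_EquityAttributableToOwnersOfParent",
--         "ifrs_EquityAttributableToOwnersOfParent",
--         "ifrs-full_Equity",
--         "ifrs_Equity",
--     ),
--     "cash_and_equivalents": (
--         "ifrs-full_CashAndCashEquivalents",
--         "ifrs_CashAndCashEquivalents",
--     ),
--     "operating_cash_flow": (
--         "ifrs-full_CashFlowsFromUsedInOperatingActivities",
--         "ifrs_CashFlowsFromUsedInOperatingActivities",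
--     ),
--     "dividends_paid": (
--         "ifrs-full_DividendsPaidClassifiedAsFinancingActivities",
--         "ifrs_DividendsPaidClassifiedAsFinancingActivities",
--         "ifrs-full_DividendsPaid",
--         "ifrs_DividendsPaid",
--         "dart_AnnualDividendsPaid",
--     ),
--     "treasury_share_purchase": (
--         "dart_AcquisitionOfTreasuryShares",
--         "ifrs-full_PurchaseOfTreasuryShares",
--         "ifrs_PurchaseOfTreasuryShares",
--     ),
--     "treasury_share_sale": (
--         "ifrs-full_SaleOrIssueOfTreasuryShares",
--         "dart_DispositionOfTreasuryShares",
--     ),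
--     "treasury_share_cancellation": ("ifrs-full_CancellationOfTreasuryShares",),
-- }
--
--
-- def _basic_fundamental_metric(
--     account_id: str,
--     metrics: dict[str, tuple[str, ...]] = BASIC_FUNDAMENTAL_METRICS,
-- ) -> str | None:
--     # Build an inverted account -> metric index (first insertion wins, matching
--     # the original's iteration order), then answer with one direct lookup.
--     inverted: dict[str, str] = {}
--     for metric, accounts in metrics.items():
--         for account in accounts:
--             inverted.setdefault(account, metric)
--     return inverted.get(account_id)
-- ===== Notes on version B (the rewrite author's own statement) =====
-- stated objective: idiomatic
-- what changed: Replaces the scan-with-membership-test over metric tuples by building an inverted account->metric index (setdefault, first-insertion-wins) and answering with a single dict lookup.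
import Mathlib
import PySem

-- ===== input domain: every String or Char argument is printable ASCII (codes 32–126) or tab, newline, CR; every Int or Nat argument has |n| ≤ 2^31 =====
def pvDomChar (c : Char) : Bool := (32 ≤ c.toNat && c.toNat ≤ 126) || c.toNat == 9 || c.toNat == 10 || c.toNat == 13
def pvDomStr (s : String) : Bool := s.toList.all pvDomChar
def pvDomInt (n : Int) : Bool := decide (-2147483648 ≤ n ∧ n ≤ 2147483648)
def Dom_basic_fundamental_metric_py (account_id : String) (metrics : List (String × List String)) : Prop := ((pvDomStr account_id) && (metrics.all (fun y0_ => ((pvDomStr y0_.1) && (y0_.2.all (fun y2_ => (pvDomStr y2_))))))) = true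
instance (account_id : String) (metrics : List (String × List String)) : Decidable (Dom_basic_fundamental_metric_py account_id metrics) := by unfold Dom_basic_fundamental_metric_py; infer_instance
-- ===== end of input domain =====

-- B builds an inverted account→metric index (setdefault, first-insertion-wins) and answers
-- with one lookup, instead of A's scan with a membership test per metric (objective: idiomatic).

-- ===== PORT A =====
-- for metric, accounts in metrics.items(): if account_id in accounts: return metric / return None
def basic_fundamental_metric_py (account_id : String) (metrics : List (String × List String)) : Option String :=
  match metrics with
  | [] => none
  | (metric, accounts) :: rest =>
      if accounts.contains account_id then some metric
      else basic_fundamental_metric_py account_id rest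

-- ===== PORT B =====
-- inverted = {}; for metric, accounts: for account in accounts: inverted.setdefault(account, metric)
def bfm_invert (metrics : List (String × List String)) : PySem.Dict String String :=
  metrics.foldl
    (fun d p => p.2.foldl (fun d account => d.setdefault account p.1) d)
    PySem.Dict.empty

def basic_fundamental_metric_py_alt (account_id : String) (metrics : List (String × List String)) : Option String :=
  (bfm_invert metrics).get? account_id

-- ===== PRECONDITION & SPEC =====
def Spec_basic_fundamental_metric_py (account_id : String) (metrics : List (String × List String)) (out : Option String) : Prop := out = basic_fundamental_metric_py_alt account_id metrics
instance (account_id : String) (metrics : List (String × List String)) (out : Option String) : Decidable (Spec_basic_fundamental_metric_py account_id metrics out) := by unfold Spec_basic_fundamental_metric_py; infer_instance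

-- ===== CLAIM (what is proved, stated in full; the proofs are below) =====
def Claim_equal_basic_fundamental_metric_py : Prop := ∀ (account_id : String) (metrics : List (String × List String)), Dom_basic_fundamental_metric_py account_id metrics → Spec_basic_fundamental_metric_py account_id metrics (basic_fundamental_metric_py account_id metrics)

-- ===== LEMMAS AND PROOFS =====

-- lookup after one setdefault: existing binding wins, else a new binding for key a
theorem bfm_get?_setdefault (d : PySem.Dict String String) (a m x : String) :
    (d.setdefault a m).get? x
      = ((d.get? x).orElse (fun _ => if x = a then some m else none)) := by
  unfold PySem.Dict.setdefault
  by_cases hc : d.contains a = true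
  · rw [if_pos hc]
    by_cases hx : x = a
    · subst hx
      have hs : (d.get? x).isSome := by
        rw [← PySem.Dict.contains_eq_isSome_get?]; exact hc
      cases hg : d.get? x with
      | none => rw [hg] at hs; simp at hs
      | some v => rfl
    · cases hg : d.get? x with
      | none => simp [hx, Option.orElse]
      | some v => rfl
  · rw [if_neg hc]
    have hins : (⟨d.items ++ [(a, m)]⟩ : PySem.Dict String String) = d.insert a m := by
      apply PySem.Dict.ext
      rw [PySem.Dict.items_insert_of_not_contains]
      simpa using hc
    rw [hins, PySem.Dict.get?_insert]
    by_cases hx : x = a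
    · subst hx
      have hg : d.get? x = none := by
        cases hg : d.get? x with
        | none => rfl
        | some v =>
            exfalso; apply hc
            rw [PySem.Dict.contains_eq_isSome_get?, hg]; rfl
      rw [if_pos rfl, hg]; simp [Option.orElse]
    · rw [if_neg hx]
      cases hg : d.get? x with
      | none => simp [hx, Option.orElse]
      | some v => rfl

-- looking up x after setdefault-ing every account of one metric into d
theorem bfm_get?_inner (x m : String) (accounts : List String) (d : PySem.Dict String String) :
    (accounts.foldl (fun d account => d.setdefault account m) d).get? x
      = ((d.get? x).orElse (fun _ => if accounts.contains x then some m else none)) := by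
  induction accounts generalizing d with
  | nil => simp only [List.foldl_nil]; cases hg : d.get? x <;> simp [Option.orElse]
  | cons a rest ih =>
      simp only [List.foldl_cons, ih, bfm_get?_setdefault]
      cases hg : d.get? x with
      | some v => rfl
      | none =>
          by_cases hx : x = a
          · subst hx; simp [Option.orElse]
          · have : ((a :: rest).contains x) = rest.contains x := by
              simp [hx]
            rw [this]
            simp [Option.orElse, hx]

-- looking up x in the index built from ms on top of d: d's answer, else A's scan of ms
theorem bfm_get?_foldl (x : String) (ms : List (String × List String)) (d : PySem.Dict String String) :
    (ms.foldl (fun d p => p.2.foldl (fun d account => d.setdefault account p.1) d) d).get? x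
      = ((d.get? x).orElse (fun _ => basic_fundamental_metric_py x ms)) := by
  induction ms generalizing d with
  | nil =>
      simp only [List.foldl_nil, basic_fundamental_metric_py]
      cases hg : d.get? x <;> simp [Option.orElse]
  | cons p rest ih =>
      obtain ⟨m, accounts⟩ := p
      simp only [List.foldl_cons, ih, bfm_get?_inner]
      cases hg : d.get? x with
      | some v => rfl
      | none =>
          simp only [basic_fundamental_metric_py]
          by_cases hc : accounts.contains x = true
          · simp [Option.orElse, show x ∈ accounts by simpa using hc]
          · have hm : ¬ x ∈ accounts := by simpa using hc
            simp only [hc, Option.orElse]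
            cases basic_fundamental_metric_py x rest <;> rfl

-- ===== VERDICT (by name: the statement is the Claim_ definition above) =====
theorem basic_fundamental_metric_py_spec : Claim_equal_basic_fundamental_metric_py := by
  intro account_id metrics _
  unfold Spec_basic_fundamental_metric_py basic_fundamental_metric_py_alt bfm_invert
  rw [bfm_get?_foldl]
  simp [Option.orElse]
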